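-- pv_equiv track=rewrite | github.com/aceventura82/rummi | rummiApp/games.py | valThreeOfAKind
-- ===== SOURCE A (Python) =====
-- def removeInitialJokers(cardList):
--     # remove all initials joker
--     i = 0
--     while i < len(cardList):
--         if cardList[i] == 'XX':
--             del cardList[i]
--             i -= 1
--         else:
--             break
--         i += 1
--     return cardList
--
-- def valThreeOfAKind(cards):
--     cardList = cards.split(',')
--     if len(cardList) < 3:
--         return False
--     # remove all initials joker
--     cardList = removeInitialJokers(cardList)
--     if len(cardList) == 0:
--         return False
--     prevCard = cardList[0][0:1]
--     for i in range(1, len(cardList)):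
--         if cardList[i] == 'XX':
--             continue
--         if cardList[i][0:1] != str(prevCard):
--             return False
--     return True
-- ===== SOURCE B (Python) =====
-- def valThreeOfAKind(cards):
--     fields = cards.split(',')
--     if len(fields) < 3:
--         return False
--     ranks = {c[0:1] for c in fields if c != 'XX'}
--     return len(ranks) == 1
-- ===== Notes on version B (the rewrite author's own statement) =====
-- stated objective: simpler
-- what changed: Replaces the in-place joker-stripping helper plus the indexed compare-to-previous scan with a single pass that collects the distinct rank prefixes of the non-joker fields into a set and tests that exactly one rank occurs.
import Mathlib
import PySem

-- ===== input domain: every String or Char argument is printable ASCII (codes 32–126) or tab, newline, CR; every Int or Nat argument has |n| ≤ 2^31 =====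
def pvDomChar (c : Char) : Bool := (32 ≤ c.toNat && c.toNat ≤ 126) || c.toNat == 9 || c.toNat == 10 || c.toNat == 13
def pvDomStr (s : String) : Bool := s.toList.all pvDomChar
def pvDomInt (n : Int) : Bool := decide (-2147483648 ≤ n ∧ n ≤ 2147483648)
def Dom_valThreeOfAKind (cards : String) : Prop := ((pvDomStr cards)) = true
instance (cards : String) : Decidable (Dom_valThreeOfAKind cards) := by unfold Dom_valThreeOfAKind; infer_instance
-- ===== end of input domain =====

-- B replaces the joker-stripping helper and the compare-to-previous scan by a set of
-- distinct rank prefixes of the non-joker fields (objective: simpler).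

-- ===== PORT A =====
-- while-loop that deletes leading 'XX' entries (i stays 0 until the first non-joker, then break)
def removeInitialJokers : List String → List String
  | [] => []
  | c :: rest => if c == "XX" then removeInitialJokers rest else c :: rest

-- the 'for i in range(1, len(cardList))' loop body, walking the tail; str(prevCard) = prevCard (already a str)
def valThreeOfAKindLoop (prevCard : String) : List String → Bool
  | [] => true
  | c :: rest =>
    if c == "XX" then valThreeOfAKindLoop prevCard rest
    else if PySem.Str.slice c (some 0) (some 1) != prevCard then false
    else valThreeOfAKindLoop prevCard rest

def valThreeOfAKind (cards : String) : Bool :=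
  let cardList := (PySem.Str.split? cards ",").getD []  -- sep "," ≠ "" so split? is always some
  if cardList.length < 3 then false
  else
    let cardList := removeInitialJokers cardList
    if cardList.length == 0 then false
    else
      let prevCard := PySem.Str.slice (cardList.headD "") (some 0) (some 1)
      valThreeOfAKindLoop prevCard (cardList.drop 1)

-- ===== PORT B =====
def valThreeOfAKind_alt (cards : String) : Bool :=
  let fields := (PySem.Str.split? cards ",").getD []  -- sep "," ≠ "" so split? is always some
  if fields.length < 3 then false
  else
    let ranks : PySem.Set String :=
      PySem.Set.ofList ((fields.filter (fun c => c != "XX")).map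
        (fun c => PySem.Str.slice c (some 0) (some 1)))
    PySem.Set.len ranks == 1

-- ===== PRECONDITION & SPEC =====
def Spec_valThreeOfAKind (cards : String) (out : Bool) : Prop := out = valThreeOfAKind_alt cards
instance (cards : String) (out : Bool) : Decidable (Spec_valThreeOfAKind cards out) := by unfold Spec_valThreeOfAKind; infer_instance

-- ===== CLAIM (what is proved, stated in full; the proofs are below) =====
def Claim_equal_valThreeOfAKind : Prop := ∀ (cards : String), Dom_valThreeOfAKind cards → Spec_valThreeOfAKind cards (valThreeOfAKind cards)

-- ===== LEMMAS AND PROOFS =====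

-- A's tail loop succeeds iff every non-joker card in the tail has the prefix prevCard.
theorem loop_eq_all (p : String) (l : List String) :
    valThreeOfAKindLoop p l
      = ((l.filter (fun c => c != "XX")).map
          (fun c => PySem.Str.slice c (some 0) (some 1))).all (· == p) := by
  induction l with
  | nil => rfl
  | cons c rest ih =>
    by_cases hx : c = "XX"
    · simp [valThreeOfAKindLoop, hx, ih]
    · by_cases hp : PySem.Str.slice c (some 0) (some 1) = p
      · simp [valThreeOfAKindLoop, hx, hp, ih]
      · simp [valThreeOfAKindLoop, hx, hp]

theorem add_len_ge (s : PySem.Set String) (x : String) :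
    s.length ≤ (PySem.Set.add s x).length := by
  unfold PySem.Set.add
  split <;> simp

theorem foldl_add_len_ge (ys : List String) (s : PySem.Set String) :
    s.length ≤ (ys.foldl PySem.Set.add s).length := by
  induction ys generalizing s with
  | nil => simp
  | cons y ys ih => exact le_trans (add_len_ge s y) (ih _)

theorem foldl_add_singleton (p : String) (ys : List String) :
    (ys.foldl PySem.Set.add [p]).length = 1 ↔ ys.all (· == p) := by
  induction ys with
  | nil => simp
  | cons y ys ih =>
    by_cases hy : y = p
    · have : PySem.Set.add [p] y = [p] := by
        simp [PySem.Set.add, PySem.Set.contains, hy]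
      simp [List.foldl_cons, ih, hy]
    · have hadd : PySem.Set.add [p] y = [p, y] := by
        simp [PySem.Set.add, PySem.Set.contains, hy]
      have h2 : 2 ≤ ((y :: ys).foldl PySem.Set.add [p]).length := by
        have := foldl_add_len_ge ys [p, y]
        simpa [List.foldl_cons, hadd] using this
      constructor
      · intro h; omega
      · intro h; simp at h; exact absurd h.1 hy

-- the main list-level fact: A's post-length-check computation equals B's set test
theorem core_eq (l : List String) :
    (let l' := removeInitialJokers l
     if l'.length == 0 then false
     else valThreeOfAKindLoop (PySem.Str.slice (l'.headD "") (some 0) (some 1)) (l'.drop 1))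
      = (PySem.Set.len (PySem.Set.ofList ((l.filter (fun c => c != "XX")).map
          (fun c => PySem.Str.slice c (some 0) (some 1)))) == 1) := by
  induction l with
  | nil => rfl
  | cons c rest ih =>
    by_cases hx : c = "XX"
    · simpa [removeInitialJokers, hx] using ih
    · have hrm : removeInitialJokers (c :: rest) = c :: rest := by
        simp [removeInitialJokers, hx]
      have hfil : (c :: rest).filter (fun c => c != "XX")
          = c :: rest.filter (fun c => c != "XX") := by simp [hx]
      simp only [hrm, hfil, List.length_cons, List.headD_cons, List.drop_one,
        List.tail_cons, List.map_cons]
      rw [if_neg (by simp)]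
      rw [loop_eq_all]
      have hofl : PySem.Set.ofList (PySem.Str.slice c (some 0) (some 1) ::
            (rest.filter (fun c => c != "XX")).map (fun c => PySem.Str.slice c (some 0) (some 1)))
          = ((rest.filter (fun c => c != "XX")).map
              (fun c => PySem.Str.slice c (some 0) (some 1))).foldl PySem.Set.add
              [PySem.Str.slice c (some 0) (some 1)] := by
        simp [PySem.Set.ofList, PySem.Set.add, PySem.Set.empty, PySem.Set.contains]
      rw [hofl]
      rcases hkey : (((rest.filter (fun c => c != "XX")).map
          (fun c => PySem.Str.slice c (some 0) (some 1))).all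
          (· == PySem.Str.slice c (some 0) (some 1))) with _ | _
      · have hne : (((rest.filter (fun c => c != "XX")).map
            (fun c => PySem.Str.slice c (some 0) (some 1))).foldl PySem.Set.add
            [PySem.Str.slice c (some 0) (some 1)]).length ≠ 1 := by
          intro h
          rw [(foldl_add_singleton _ _).mp h] at hkey
          simp at hkey
        have : (PySem.Set.len ((((rest.filter (fun c => c != "XX")).map
            (fun c => PySem.Str.slice c (some 0) (some 1))).foldl PySem.Set.add
            [PySem.Str.slice c (some 0) (some 1)])) == 1) = false := by
          simp only [PySem.Set.len, beq_eq_false_iff_ne, ne_eq]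
          exact_mod_cast hne
        rw [this]
      · have hl1 : (((rest.filter (fun c => c != "XX")).map
            (fun c => PySem.Str.slice c (some 0) (some 1))).foldl PySem.Set.add
            [PySem.Str.slice c (some 0) (some 1)]).length = 1 :=
          (foldl_add_singleton _ _).mpr hkey
        simp [PySem.Set.len, hl1]

-- ===== VERDICT (by name: the statement is the Claim_ definition above) =====
theorem valThreeOfAKind_spec : Claim_equal_valThreeOfAKind := by
  intro cards _
  unfold Spec_valThreeOfAKind valThreeOfAKind valThreeOfAKind_alt
  by_cases h : ((PySem.Str.split? cards ",").getD []).length < 3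
  · simp only [if_pos h]
  · simp only [if_neg h]
    exact core_eq _
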